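-- pv_equiv track=rewrite | github.com/Alexander10100/application-programming | lab_2/Lab_2.py | thousand
-- ===== SOURCE A (Python) =====
-- def thousand(original_string):  # Правильность написание тысячи
--     x = int(original_string[-5:-3])
--     if x == 1:
--         return 'тысяча '
--     elif x == 2:
--         return 'тысячи '
--     elif 2 < x < 20 or x == 0:
--         return 'тысяч '
--     elif 19 < x < 100:
--         return thousand(original_string[-4:])
-- ===== SOURCE B (Python) =====
-- def thousand(original_string):  # Правильность написание тысячи
--     x = int(original_string[-5:-3])
--     e = x if x < 20 else x % 10
--     if e == 1:
--         return 'тысяча '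
--     elif e == 2:
--         return 'тысячи '
--     else:
--         return 'тысяч '
-- ===== Notes on version B (the rewrite author's own statement) =====
-- stated objective: simpler
-- what changed: Replaces A's self-recursion on the last four characters with a single arithmetic reduction e = x if x < 20 else x % 10, so the grammatical form is picked by one branch chain with no recursion and no second slice-and-parse.
-- outside the precondition, e.g. on thousand('-1000'): A returns None, B returns 'тысяч '
import Mathlib
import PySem

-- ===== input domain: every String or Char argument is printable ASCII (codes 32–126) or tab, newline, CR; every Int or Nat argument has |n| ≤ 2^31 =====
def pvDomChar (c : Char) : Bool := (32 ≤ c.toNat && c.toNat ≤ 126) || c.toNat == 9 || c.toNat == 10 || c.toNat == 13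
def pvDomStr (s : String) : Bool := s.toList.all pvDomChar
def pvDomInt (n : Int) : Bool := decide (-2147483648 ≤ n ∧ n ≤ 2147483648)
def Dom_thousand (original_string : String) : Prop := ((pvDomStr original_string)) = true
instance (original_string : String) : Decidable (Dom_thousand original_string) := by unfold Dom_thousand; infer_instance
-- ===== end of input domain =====

-- B replaces A's one-level self-recursion on the last four characters by the arithmetic
-- reduction e = x if x < 20 else x % 10 and a single branch chain (objective: simpler).

-- ===== PORT A =====
-- Fuel makes A's self-recursion structural. The Python recursion has depth at most 1 (the
-- recursive call parses a slice of length ≤ 1, giving x ≤ 9), so fuel 2 is never exhausted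
-- where the Python returns; the `none` branches are exactly where Python raises or returns None.
def thousandAux : Nat → String → Option String
  | 0, _ => none
  | fuel + 1, s =>
    match PySem.Int.ofStr? (PySem.Str.slice s (some (-5)) (some (-3))) with
    | none => none   -- int() raises ValueError: excluded by Pre_thousand
    | some x =>
      if x = 1 then some "тысяча "
      else if x = 2 then some "тысячи "
      else if (2 < x ∧ x < 20) ∨ x = 0 then some "тысяч "
      else if 19 < x ∧ x < 100 then thousandAux fuel (PySem.Str.slice s (some (-4)) none)
      else none      -- Python falls off the end and returns None: excluded by Pre_thousand

def thousand (original_string : String) : String :=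
  (thousandAux 2 original_string).getD ""

-- ===== PORT B =====
def thousand_alt (original_string : String) : String :=
  match PySem.Int.ofStr? (PySem.Str.slice original_string (some (-5)) (some (-3))) with
  | none => ""     -- int() raises ValueError in Python: excluded by Pre_thousand
  | some x =>
    let e := if x < 20 then x else PySem.Int.mod x 10
    if e = 1 then "тысяча " else if e = 2 then "тысячи " else "тысяч "

-- ===== PRECONDITION & SPEC =====
-- Pre_ excludes exactly the inputs where Python A does not return a string: where
-- int(original_string[-5:-3]) raises ValueError, and where the parsed value is negative
-- (then A falls off the end of its branch chain and returns None, which is not a str).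
def Pre_thousand (original_string : String) : Prop :=
  0 ≤ (PySem.Int.ofStr? (PySem.Str.slice original_string (some (-5)) (some (-3)))).getD (-1)
instance (original_string : String) : Decidable (Pre_thousand original_string) := by
  unfold Pre_thousand; infer_instance

def pvWitness_thousand : String := "21000"

def Spec_thousand (original_string : String) (out : String) : Prop := out = thousand_alt original_string
instance (original_string : String) (out : String) : Decidable (Spec_thousand original_string out) := by unfold Spec_thousand; infer_instance

-- ===== CLAIM (what is proved, stated in full; the proofs are below) =====
def Claim_equal_thousand : Prop := ∀ (original_string : String), Dom_thousand original_string → Pre_thousand original_string → Spec_thousand original_string (thousand original_string)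

-- ===== LEMMAS AND PROOFS =====

-- Decidable checks over single characters/pairs, verified for all codes < 128 (covers Dom).
def pvCheckPair (c1 c2 : Char) : Bool :=
  match PySem.Int.ofChars? [c1, c2] with
  | none => true
  | some x => decide (x < 100) &&
      (!(decide (20 ≤ x)) || (PySem.Int.ofChars? [c2] == some (PySem.Int.mod x 10)))

def pvCheckSingle (c : Char) : Bool :=
  match PySem.Int.ofChars? [c] with
  | none => true
  | some x => decide (x < 10)

set_option maxHeartbeats 4000000 in
set_option maxRecDepth 8192 in
theorem pvPairLemma : ∀ n1 < 128, ∀ n2 < 128, pvCheckPair (Char.ofNat n1) (Char.ofNat n2) = true := by decide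

set_option maxRecDepth 2048 in
theorem pvSingleLemma : ∀ n < 128, pvCheckSingle (Char.ofNat n) = true := by decide

theorem charCode_lt128 (c : Char) (h : pvDomChar c = true) : c.toNat < 128 := by
  simp [pvDomChar] at h; omega

theorem pvPair_facts (c1 c2 : Char) (h1 : c1.toNat < 128) (h2 : c2.toNat < 128) {x : Int}
    (hx : PySem.Int.ofChars? [c1, c2] = some x) :
    x < 100 ∧ (20 ≤ x → PySem.Int.ofChars? [c2] = some (PySem.Int.mod x 10)) := by
  have h := pvPairLemma c1.toNat h1 c2.toNat h2
  rw [Char.ofNat_toNat, Char.ofNat_toNat] at h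
  unfold pvCheckPair at h
  rw [hx] at h
  simp only [Bool.and_eq_true, Bool.or_eq_true, Bool.not_eq_eq_eq_not, Bool.not_true,
    decide_eq_true_eq, decide_eq_false_iff_not, beq_iff_eq, not_le] at h
  exact ⟨h.1, fun h20 => by rcases h.2 with h' | h'; omega; exact h'⟩

theorem pvSingle_facts (c : Char) (h1 : c.toNat < 128) {x : Int}
    (hx : PySem.Int.ofChars? [c] = some x) : x < 10 := by
  have h := pvSingleLemma c.toNat h1
  rw [Char.ofNat_toNat] at h
  unfold pvCheckSingle at h
  rw [hx] at h
  simpa using h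

-- rfl/rw unfolding lemmas for the fuelled recursion (avoid simp-unfolding the match)
theorem thousandAux_succ (f : Nat) (s : String) :
    thousandAux (f + 1) s =
      match PySem.Int.ofStr? (PySem.Str.slice s (some (-5)) (some (-3))) with
      | none => none
      | some x =>
        if x = 1 then some "тысяча "
        else if x = 2 then some "тысячи "
        else if (2 < x ∧ x < 20) ∨ x = 0 then some "тысяч "
        else if 19 < x ∧ x < 100 then thousandAux f (PySem.Str.slice s (some (-4)) none)
        else none := by
  rw [thousandAux]

theorem thousandAux_eval (f : Nat) (s : String) (x : Int)
    (h : PySem.Int.ofStr? (PySem.Str.slice s (some (-5)) (some (-3))) = some x) :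
    thousandAux (f + 1) s =
      (if x = 1 then some "тысяча "
       else if x = 2 then some "тысячи "
       else if (2 < x ∧ x < 20) ∨ x = 0 then some "тысяч "
       else if 19 < x ∧ x < 100 then thousandAux f (PySem.Str.slice s (some (-4)) none)
       else none) := by
  rw [thousandAux_succ, h]

theorem thousand_alt_eval (s : String) (x : Int)
    (h : PySem.Int.ofStr? (PySem.Str.slice s (some (-5)) (some (-3))) = some x) :
    thousand_alt s =
      (if (if x < 20 then x else PySem.Int.mod x 10) = 1 then "тысяча "
       else if (if x < 20 then x else PySem.Int.mod x 10) = 2 then "тысячи "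
       else "тысяч ") := by
  unfold thousand_alt
  rw [h]

-- a length-4 list sliced with [-5:-3] keeps exactly its first character
theorem pvSlice4 (xs : List Char) (hx : xs.length = 4) :
    PySem.List.slice xs (some (-5)) (some (-3)) = xs.take 1 := by
  simp only [PySem.List.slice, PySem.List.clampIdx, hx]
  norm_num

-- ===== VERDICT (by name: the statement is the Claim_ definition above) =====
set_option maxHeartbeats 1600000 in
theorem thousand_spec : Claim_equal_thousand := by
  intro s hdom hpre
  unfold Spec_thousand Pre_thousand at *
  rcases h : PySem.Int.ofStr? (PySem.Str.slice s (some (-5)) (some (-3))) with _ | x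
  · rw [h] at hpre; norm_num at hpre
  · rw [h] at hpre
    simp only [Option.getD_some] at hpre
    have hA : thousand s = (thousandAux (1 + 1) s).getD "" := rfl
    rw [hA, thousandAux_eval 1 s x h, thousand_alt_eval s x h]
    have hchars : PySem.Int.ofChars? (PySem.List.slice s.toList (some (-5)) (some (-3))) = some x := by
      have hlist : (PySem.Str.slice s (some (-5)) (some (-3))).toList
          = PySem.List.slice s.toList (some (-5)) (some (-3)) := by
        simp [PySem.Str.toList_slice]
      rw [← hlist]; exact h
    by_cases h1 : x = 1
    · subst h1; norm_num
    · by_cases h2 : x = 2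
      · subst h2; norm_num
      · by_cases h3 : (2 < x ∧ x < 20) ∨ x = 0
        · have hlt : x < 20 := by omega
          simp only [if_pos h3, if_neg h1, if_neg h2, if_pos hlt]
          simp
        · -- remaining: 20 ≤ x; the slice has ≤ 2 characters, so x < 100 and the recursion fires
          have hx20 : 20 ≤ x := by omega
          set cs := s.toList with hcs
          have hclamp3 : PySem.List.clampIdx cs.length (-3) = cs.length - 3 := by
            simp only [PySem.List.clampIdx]
            split_ifs <;> omega
          have hclamp5 : PySem.List.clampIdx cs.length (-5) = cs.length - 5 := by
            simp only [PySem.List.clampIdx]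
            split_ifs <;> omega
          have hclamp4 : PySem.List.clampIdx cs.length (-4) = cs.length - 4 := by
            simp only [PySem.List.clampIdx]
            split_ifs <;> omega
          have hulen : (PySem.List.slice cs (some (-5)) (some (-3))).length = (cs.length - 3) - (cs.length - 5) := by
            rw [PySem.List.length_slice, hclamp3, hclamp5]
          have hdomu : ∀ c ∈ PySem.List.slice cs (some (-5)) (some (-3)), c.toNat < 128 := by
            intro c hc
            have hd : pvDomChar c = true := by
              have hall := hdom
              unfold Dom_thousand pvDomStr at hall
              exact List.all_eq_true.mp hall c
                (by simpa [hcs] using PySem.List.mem_of_mem_slice cs _ _ hc)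
            exact charCode_lt128 c hd
          rcases hu : PySem.List.slice cs (some (-5)) (some (-3)) with _ | ⟨c1, _ | ⟨c2, rest⟩⟩
          · rw [hu] at hchars
            simp [show PySem.Int.ofChars? ([] : List Char) = none from by decide] at hchars
          · rw [hu] at hchars
            have := pvSingle_facts c1 (hdomu c1 (by rw [hu]; exact List.mem_singleton_self c1)) hchars
            omega
          · -- two characters: the slice length forces rest = [] and l ≥ 5
            have hlen2 : (cs.length - 3) - (cs.length - 5) = 2 + rest.length := by
              rw [← hulen, hu]; simp; omega
            have hrest : rest = [] := List.length_eq_zero_iff.mp (by omega)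
            subst hrest
            have hl5 : 5 ≤ cs.length := by omega
            rw [hu] at hchars
            have hpf := pvPair_facts c1 c2
              (hdomu c1 (by rw [hu]; exact List.mem_cons_self))
              (hdomu c2 (by rw [hu]; exact List.mem_cons_of_mem _ List.mem_cons_self)) hchars
            have hx100 : x < 100 := hpf.1
            have hc2 : PySem.Int.ofChars? [c2] = some (PySem.Int.mod x 10) := hpf.2 hx20
            have hdroplen : (cs.drop (cs.length - 5)).length = 5 := by simp; omega
            have hu' : PySem.List.slice cs (some (-5)) (some (-3)) = (cs.drop (cs.length - 5)).take 2 := by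
              simp only [PySem.List.slice, hclamp3, hclamp5]
              have h2eq : cs.length - 3 - (cs.length - 5) = 2 := by omega
              rw [h2eq]
            have hs' : (PySem.Str.slice s (some (-4)) none).toList = cs.drop (cs.length - 4) := by
              rw [PySem.Str.toList_slice, PySem.Chars.slice_eq_listSlice]
              simp only [PySem.List.slice, hclamp4, ← hcs]
              exact List.take_of_length_le (by simp)
            have hdrop4 : cs.drop (cs.length - 4) = (cs.drop (cs.length - 5)).drop 1 := by
              rw [List.drop_drop]
              rw [show cs.length - 5 + 1 = cs.length - 4 from by omega]
            obtain ⟨tl, htl⟩ : ∃ tl, cs.drop (cs.length - 5) = c1 :: c2 :: tl := by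
              rcases hd : cs.drop (cs.length - 5) with _ | ⟨a, _ | ⟨b, tl⟩⟩
              · rw [hd] at hdroplen; simp at hdroplen
              · rw [hd] at hdroplen; simp at hdroplen
              · rw [hu', hd] at hu
                simp at hu
                exact ⟨tl, by rw [hu.1, hu.2]⟩
            have h4 : (cs.drop (cs.length - 4)).length = 4 := by simp; omega
            have hone : PySem.List.slice (cs.drop (cs.length - 4)) (some (-5)) (some (-3)) = [c2] := by
              rw [pvSlice4 _ h4, hdrop4, htl]
              rfl
            have hinner : PySem.Int.ofStr? (PySem.Str.slice (PySem.Str.slice s (some (-4)) none) (some (-5)) (some (-3)))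
                = some (PySem.Int.mod x 10) := by
              show PySem.Int.ofChars?
                (PySem.Str.slice (PySem.Str.slice s (some (-4)) none) (some (-5)) (some (-3))).toList
                = some (PySem.Int.mod x 10)
              rw [PySem.Str.toList_slice, PySem.Chars.slice_eq_listSlice, hs', hone, hc2]
            have hd0 : 0 ≤ PySem.Int.mod x 10 := PySem.Int.mod_nonneg x (by norm_num)
            have hd10 : PySem.Int.mod x 10 < 10 := PySem.Int.mod_lt x (by norm_num)
            have hrec : 19 < x ∧ x < 100 := ⟨by omega, hx100⟩
            rw [if_neg h1, if_neg h2, if_neg h3, if_pos hrec]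
            have hA1 : thousandAux 1 (PySem.Str.slice s (some (-4)) none)
                = thousandAux (0 + 1) (PySem.Str.slice s (some (-4)) none) := rfl
            rw [hA1, thousandAux_eval 0 _ _ hinner]
            have hnlt : ¬ x < 20 := by omega
            rw [if_neg hnlt]
            set d := PySem.Int.mod x 10 with hdd
            by_cases hd1 : d = 1
            · simp [hd1]
            · by_cases hd2 : d = 2
              · simp [hd2]
              · have h30 : (2 < d ∧ d < 20) ∨ d = 0 := by omega
                simp [if_pos h30, hd1, hd2]
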